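-- pv_equiv track=rewrite | github.com/harripd/mcc-daq-acquisition | visualize_vispy_lines.py | zip_color
-- ===== SOURCE A (Python) =====
-- def zip_color(val, color, fill):
--     citer = iter(color)
--     has_colors = True
--     for v in val:
--         if has_colors:
--             try:
--                 c = next(citer)
--             except StopIteration:
--                 has_colors = False
--                 c = fill
--         yield v, c
-- ===== SOURCE B (Python) =====
-- def zip_color(val, color, fill):
--     # Phase 1: paired prefix; phase 2: the leftover values, each with fill.
--     yield from zip(val, color)
--     for v in val[len(color):]:
--         yield v, fill
-- ===== Notes on version B (the rewrite author's own statement) =====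
-- stated objective: simpler
-- what changed: Replaces the stateful single loop (has_colors flag, try/except StopIteration) with two staged passes: zip the common prefix, then emit the sliced tail val[len(color):] each paired with fill.
import Mathlib
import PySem

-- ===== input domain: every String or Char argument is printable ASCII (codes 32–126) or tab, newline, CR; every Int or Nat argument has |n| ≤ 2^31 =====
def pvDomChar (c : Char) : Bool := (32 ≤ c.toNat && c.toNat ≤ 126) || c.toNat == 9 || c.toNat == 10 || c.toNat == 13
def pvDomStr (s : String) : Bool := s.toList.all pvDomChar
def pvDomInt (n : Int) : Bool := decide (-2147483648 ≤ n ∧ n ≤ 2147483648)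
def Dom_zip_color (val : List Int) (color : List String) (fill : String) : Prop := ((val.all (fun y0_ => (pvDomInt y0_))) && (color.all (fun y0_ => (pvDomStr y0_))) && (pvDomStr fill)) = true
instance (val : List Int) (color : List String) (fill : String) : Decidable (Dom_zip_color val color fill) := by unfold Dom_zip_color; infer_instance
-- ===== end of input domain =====

-- B replaces A's stateful loop (has_colors flag, try/except) by two staged passes: zip the common prefix, then pair the sliced tail val[len(color):] with fill (simpler; same cost).

-- ===== PORT A =====
-- A's generator loop: state is the remaining color iterator and the has_colors flag.
def zip_color_go (val : List Int) (citer : List String) (has_colors : Bool) (fill : String) : List (Int × String) :=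
  match val with
  | [] => []
  | v :: vs =>
    if has_colors then
      match citer with
      | c :: cs => (v, c) :: zip_color_go vs cs true fill
      | [] => (v, fill) :: zip_color_go vs [] false fill
    else
      (v, fill) :: zip_color_go vs citer false fill

def zip_color (val : List Int) (color : List String) (fill : String) : List (Int × String) :=
  zip_color_go val color true fill

-- ===== PORT B =====
-- zip(val, color) then the slice val[len(color):] each paired with fill.
def zip_color_alt (val : List Int) (color : List String) (fill : String) : List (Int × String) :=
  val.zip color ++ (PySem.List.slice val (some (color.length : Int)) none).map (fun v => (v, fill))

-- ===== PRECONDITION & SPEC =====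
def Spec_zip_color (val : List Int) (color : List String) (fill : String) (out : List (Int × String)) : Prop := out = zip_color_alt val color fill
instance (val : List Int) (color : List String) (fill : String) (out : List (Int × String)) : Decidable (Spec_zip_color val color fill out) := by unfold Spec_zip_color; infer_instance

-- ===== CLAIM =====
def Claim_equal_zip_color : Prop := ∀ (val : List Int) (color : List String) (fill : String), Dom_zip_color val color fill → Spec_zip_color val color fill (zip_color val color fill)

-- ===== LEMMAS AND PROOFS =====
theorem zip_color_go_false (val : List Int) (citer : List String) (fill : String) :
    zip_color_go val citer false fill = val.map (fun v => (v, fill)) := by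
  induction val generalizing citer with
  | nil => rfl
  | cons v vs ih => simp [zip_color_go, ih]

theorem zip_color_go_true (val : List Int) (color : List String) (fill : String) :
    zip_color_go val color true fill
      = val.zip color ++ (val.drop color.length).map (fun v => (v, fill)) := by
  induction val generalizing color with
  | nil => simp [zip_color_go]
  | cons v vs ih =>
    cases color with
    | nil => simp [zip_color_go, zip_color_go_false]
    | cons c cs => simp [zip_color_go, ih]

-- ===== VERDICT =====
theorem zip_color_spec : Claim_equal_zip_color := by
  intro val color fill _
  unfold Spec_zip_color zip_color zip_color_alt
  rw [PySem.List.slice_from_natCast]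
  exact zip_color_go_true val color fill
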